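-- pv_equiv track=rewrite | github.com/ctmartinez1992/advent-of-code-2023 | days/day4_2.py | final
-- ===== SOURCE A (Python) =====
-- from collections import defaultdict
--
-- def final(results: list):
--     scratchcards = defaultdict(lambda: 1)
--     for result in results:
--         game_id, winning_numbers, card_numbers = result
--
--         for i in range(scratchcards[game_id]):
--             id_won = game_id + 1
--             for n in card_numbers:
--                 if n in winning_numbers:
--                     scratchcards[id_won] += 1
--                     id_won += 1
--
--     return sum(scratchcards.values())
-- ===== SOURCE B (Python) =====
-- def final(results: list):
--     # One pass per card: count matches once via a set, then add this card's
--     # copy count to each of the next `matches` card ids in a single sweep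
--     # (A re-scans the card once per copy instead).
--     counts = {}
--     for game_id, winning_numbers, card_numbers in results:
--         wset = set(winning_numbers)
--         matches = sum(1 for n in card_numbers if n in wset)
--         copies = counts.setdefault(game_id, 1)
--         for j in range(matches):
--             k = game_id + 1 + j
--             counts[k] = counts.get(k, 1) + copies
--     return sum(counts.values())
-- ===== Notes on version B (the rewrite author's own statement) =====
-- stated objective: faster
-- what changed: B counts each card's matches once using a set and adds the card's copy count to the next `matches` card ids in a single arithmetic sweep, instead of A's re-scanning the whole card (with a linear list membership test) once per accumulated copy.
import Mathlib
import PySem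

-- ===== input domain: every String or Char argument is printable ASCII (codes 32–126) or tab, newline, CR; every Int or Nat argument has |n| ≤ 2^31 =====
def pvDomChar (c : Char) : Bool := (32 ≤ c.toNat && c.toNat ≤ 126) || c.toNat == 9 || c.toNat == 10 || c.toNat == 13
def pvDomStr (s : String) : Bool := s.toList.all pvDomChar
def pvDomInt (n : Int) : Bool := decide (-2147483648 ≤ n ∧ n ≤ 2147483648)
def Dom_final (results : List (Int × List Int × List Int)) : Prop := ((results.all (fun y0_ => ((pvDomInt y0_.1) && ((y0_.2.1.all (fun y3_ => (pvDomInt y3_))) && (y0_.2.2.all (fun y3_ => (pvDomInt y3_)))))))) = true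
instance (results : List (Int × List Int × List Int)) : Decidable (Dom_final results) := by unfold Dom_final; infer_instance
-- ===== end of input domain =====

-- B counts each card's matches once with a set and adds the card's copy count to
-- the next `matches` ids in one sweep, instead of A's rescan of the card per copy.


-- ===== PORT A =====
-- inner loop: 'for n in card_numbers: if n in winning_numbers: scratchcards[id_won] += 1; id_won += 1';
-- state = (scratchcards, id_won); 'd[k] += 1' on a defaultdict(lambda: 1) is insert k (getD k 1 + 1)
def finalInner (winning : List Int) (card : List Int)
    (st : PySem.Dict Int Int × Int) : PySem.Dict Int Int × Int :=
  card.foldl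
    (fun st n =>
      if winning.contains n then (st.1.insert st.2 (st.1.getD st.2 1 + 1), st.2 + 1) else st)
    st

-- one result: 'scratchcards[game_id]' (a defaultdict READ inserts the default when missing),
-- then 'for i in range(copies): id_won = game_id + 1; <inner loop>'
def finalCard (d : PySem.Dict Int Int) (g : Int) (winning card : List Int) : PySem.Dict Int Int :=
  let copies := d.getD g 1
  let d := if d.contains g then d else d.insert g 1
  (PySem.List.pyRange 0 copies 1).foldl (fun d _ => (finalInner winning card (d, g + 1)).1) d

def final (results : List (Int × List Int × List Int)) : Int :=
  (results.foldl (fun d r => finalCard d r.1 r.2.1 r.2.2) PySem.Dict.empty).values.sum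

-- ===== PORT B =====
-- one card of Source B: wset = set(winning); matches = sum(1 for n in card if n in wset);
-- copies = counts.setdefault(g, 1); for j in range(matches): counts[g+1+j] = counts.get(g+1+j, 1) + copies
def altCard (d : PySem.Dict Int Int) (g : Int) (winning card : List Int) : PySem.Dict Int Int :=
  let wset := PySem.Set.ofList winning
  let mcount : Int := (card.map (fun n => if wset.contains n then (1 : Int) else 0)).sum
  let d1 := d.setdefault g 1
  let copies := d1.getD g 1
  (PySem.List.pyRange 0 mcount 1).foldl
    (fun d j => d.insert (g + 1 + j) (d.getD (g + 1 + j) 1 + copies)) d1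

def final_alt (results : List (Int × List Int × List Int)) : Int :=
  (results.foldl (fun d r => altCard d r.1 r.2.1 r.2.2) PySem.Dict.empty).values.sum

-- ===== PRECONDITION & SPEC =====
def Spec_final (results : List (Int × List Int × List Int)) (out : Int) : Prop := out = final_alt results
instance (results : List (Int × List Int × List Int)) (out : Int) : Decidable (Spec_final results out) := by unfold Spec_final; infer_instance

-- ===== CLAIM (what is proved, stated in full; the proofs are below) =====
def Claim_equal_final : Prop := ∀ (results : List (Int × List Int × List Int)), Dom_final results → Spec_final results (final results)

-- ===== LEMMAS AND PROOFS =====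

def INV (d : PySem.Dict Int Int) : Prop := ∀ v ∈ d.values, 1 ≤ v
theorem getD_ge_one (d : PySem.Dict Int Int) (k : Int) (h : INV d) : 1 ≤ d.getD k 1 := by
  cases hk : d.get? k with
  | none => rw [PySem.Dict.getD_of_get?_eq_none _ _ hk]
  | some v =>
    rw [PySem.Dict.getD_of_get?_eq_some _ _ hk]
    exact h v (by simpa [PySem.Dict.values] using List.mem_map_of_mem (f := Prod.snd) (PySem.Dict.mem_items_of_get?_eq_some _ hk))
theorem inv_empty : INV (PySem.Dict.empty : PySem.Dict Int Int) := by
  intro v hv; simp [PySem.Dict.values, PySem.Dict.empty] at hv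
theorem inv_insert (d : PySem.Dict Int Int) (k v : Int) (h : INV d) (hv : 1 ≤ v) :
    INV (d.insert k v) := by
  intro w hw
  rcases PySem.Dict.mem_values_insert _ _ _ _ hw with h1 | h1
  · omega
  · exact h w h1
theorem insert_comm_of_contains (d : PySem.Dict Int Int) (k1 k2 v1 v2 : Int)
    (hne : k1 ≠ k2) (hc : d.contains k1 = true) :
    (d.insert k2 v2).insert k1 v1 = (d.insert k1 v1).insert k2 v2 := by
  apply PySem.Dict.ext
  have hc1 : (d.insert k2 v2).contains k1 = true := by
    rw [PySem.Dict.contains_insert]; simp [hc]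
  by_cases h2 : d.contains k2 = true
  · have hc2 : (d.insert k1 v1).contains k2 = true := by
      rw [PySem.Dict.contains_insert]; simp [h2]
    rw [PySem.Dict.items_insert_of_contains _ v1 hc1,
        PySem.Dict.items_insert_of_contains _ v2 h2,
        PySem.Dict.items_insert_of_contains _ v2 hc2,
        PySem.Dict.items_insert_of_contains _ v1 hc,
        List.map_map, List.map_map]
    apply List.map_congr_left
    intro p _
    by_cases e1 : p.1 = k1 <;> by_cases e2 : p.1 = k2 <;>
      simp [Function.comp, e1, e2, hne, Ne.symm hne]
  · have h2' : d.contains k2 = false := by simpa using h2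
    have hc2 : (d.insert k1 v1).contains k2 = false := by
      rw [PySem.Dict.contains_insert]; simp [h2', Ne.symm hne]
    rw [PySem.Dict.items_insert_of_contains _ v1 hc1,
        PySem.Dict.items_insert_of_not_contains _ v2 h2',
        PySem.Dict.items_insert_of_not_contains _ v2 hc2,
        PySem.Dict.items_insert_of_contains _ v1 hc,
        List.map_append]
    simp [Ne.symm hne]
def bump (d : PySem.Dict Int Int) (k c : Int) : PySem.Dict Int Int :=
  d.insert k (d.getD k 1 + c)
def bumps (d : PySem.Dict Int Int) (s : Int) : Nat → Int → PySem.Dict Int Int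
  | 0, _ => d
  | m + 1, c => bumps (bump d s c) (s + 1) m c
theorem inv_bumps (d : PySem.Dict Int Int) (s : Int) (m : Nat) (c : Int)
    (h : INV d) (hc : 0 ≤ c) : INV (bumps d s m c) := by
  induction m generalizing d s with
  | zero => exact h
  | succ m ih =>
    exact ih (bump d s c) (s + 1) (inv_insert _ _ _ h (by have := getD_ge_one d s h; omega))
theorem contains_bump (d : PySem.Dict Int Int) (k c k' : Int) (h : d.contains k' = true) :
    (bump d k c).contains k' = true := by
  unfold bump; rw [PySem.Dict.contains_insert]; simp [h]
theorem bump_comm (d : PySem.Dict Int Int) (k c s c' : Int) (hne : k ≠ s)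
    (hc : d.contains k = true) :
    bump (bump d s c') k c = bump (bump d k c) s c' := by
  unfold bump
  rw [PySem.Dict.getD_insert_of_ne _ _ _ hne,
      PySem.Dict.getD_insert_of_ne _ _ _ (Ne.symm hne)]
  exact insert_comm_of_contains d k s _ _ hne hc
theorem bump_bump_self (d : PySem.Dict Int Int) (k c c' : Int) :
    bump (bump d k c) k c' = bump d k (c + c') := by
  unfold bump
  rw [PySem.Dict.getD_insert_self, PySem.Dict.insert_insert_self, add_assoc]
theorem bump_bumps_comm (m : Nat) (d : PySem.Dict Int Int) (s c' k c : Int)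
    (hk : k < s) (hc : d.contains k = true) :
    bump (bumps d s m c') k c = bumps (bump d k c) s m c' := by
  induction m generalizing d s with
  | zero => rfl
  | succ m ih =>
    show bump (bumps (bump d s c') (s+1) m c') k c = bumps (bump (bump d k c) s c') (s+1) m c'
    rw [ih (bump d s c') (s+1) (by omega) (contains_bump d s c' k hc),
        bump_comm d k c s c' (by omega) hc]
theorem bumps_collapse (m : Nat) (s : Int) (c : Int) (d : PySem.Dict Int Int) :
    bumps (bumps d s m c) s m 1 = bumps d s m (c + 1) := by
  induction m generalizing d s with
  | zero => rfl
  | succ m ih =>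
    show bumps (bump (bumps (bump d s c) (s+1) m c) s 1) (s+1) m 1
        = bumps (bump d s (c+1)) (s+1) m (c+1)
    rw [bump_bumps_comm m (bump d s c) (s+1) c s 1 (by omega)
          (PySem.Dict.contains_insert_self _ _ _),
        bump_bump_self, ih]
theorem finalInner_eq_bumps (winning : List Int) (card : List Int)
    (d : PySem.Dict Int Int) (s : Int) :
    finalInner winning card (d, s)
      = (bumps d s (card.countP (fun n => winning.contains n)) 1,
         s + card.countP (fun n => winning.contains n)) := by
  induction card generalizing d s with
  | nil => simp [finalInner, bumps]
  | cons n card ih =>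
    have hstep : finalInner winning (n :: card) (d, s)
        = finalInner winning card
            (if winning.contains n then (d.insert s (d.getD s 1 + 1), s + 1) else (d, s)) := rfl
    by_cases hw : winning.contains n = true
    · have hcnt : (n :: card).countP (fun n => winning.contains n)
          = card.countP (fun n => winning.contains n) + 1 := by
        simp [List.countP_cons]; simpa using hw
      rw [hstep, if_pos hw, ih, hcnt, Prod.mk.injEq]
      exact ⟨rfl, by push_cast; ring⟩
    · have hcnt : (n :: card).countP (fun n => winning.contains n)
          = card.countP (fun n => winning.contains n) := by
        simp [List.countP_cons]; simpa using hw
      rw [hstep, if_neg hw, ih, hcnt]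
theorem foldB_eq_bumps (m : Nat) (t g : Int) (d : PySem.Dict Int Int) (c : Int) :
    (PySem.List.pyRange t (t + m) 1).foldl
        (fun d j => d.insert (g + 1 + j) (d.getD (g + 1 + j) 1 + c)) d
      = bumps d (g + 1 + t) m c := by
  induction m generalizing t d with
  | zero => simp [bumps]
  | succ m ih =>
    push_cast
    rw [PySem.List.pyRange_one_cons (by omega : t < t + ((m:Nat)+1))]
    show (PySem.List.pyRange (t+1) (t + ((m:Nat)+1)) 1).foldl _ (bump d (g+1+t) c) = _
    have he : t + ((m:Nat)+1 : Int) = (t+1) + (m:Nat) := by ring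
    rw [he, ih (t+1) (bump d (g+1+t) c)]
    show bumps (bump d (g+1+t) c) (g+1+(t+1)) m c = bumps (bump d (g+1+t) c) ((g+1+t)+1) m c
    ring_nf
theorem iter_pass_eq (k : Nat) (hk : 1 ≤ k) (s : Int) (m : Nat) (d : PySem.Dict Int Int) :
    (fun d => bumps d s m 1)^[k] d = bumps d s m (k : Int) := by
  induction k, hk using Nat.le_induction generalizing d with
  | base => simp
  | succ k hk ih =>
    rw [Function.iterate_succ_apply', ih, bumps_collapse]
    push_cast; ring_nf
theorem foldl_const_iterate (l : List Int) (f : PySem.Dict Int Int → PySem.Dict Int Int)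
    (d : PySem.Dict Int Int) : l.foldl (fun d _ => f d) d = f^[l.length] d := by
  induction l generalizing d with
  | nil => rfl
  | cons x l ih => rw [List.foldl_cons, ih, List.length_cons, Function.iterate_succ_apply]
theorem altCard_eq_bumps (d : PySem.Dict Int Int) (g : Int) (winning card : List Int) :
    altCard d g winning card
      = bumps (d.setdefault g 1) (g + 1)
          (card.countP (fun n => winning.contains n)) (d.getD g 1) := by
  show (PySem.List.pyRange 0
        ((card.map (fun n => if (PySem.Set.ofList winning).contains n then (1 : Int) else 0)).sum) 1).foldl
      (fun d' j => d'.insert (g + 1 + j) (d'.getD (g + 1 + j) 1 + (d.setdefault g 1).getD g 1))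
      (d.setdefault g 1) = _
  have hcnt : (card.map (fun n => if (PySem.Set.ofList winning).contains n then (1 : Int) else 0)).sum
      = ((card.countP (fun n => winning.contains n) : Nat) : Int) := by
    rw [PySem.List.sum_map_ite_one_zero]
    norm_cast
    apply List.countP_congr
    intro x _
    simp [PySem.Set.mem_ofList]
  rw [hcnt, PySem.Dict.getD_setdefault_self]
  have h0 : ((card.countP (fun n => winning.contains n) : Nat) : Int)
      = 0 + ((card.countP (fun n => winning.contains n) : Nat) : Int) := by ring
  rw [h0, foldB_eq_bumps, add_zero]

theorem card_step_eq (d : PySem.Dict Int Int) (g : Int) (winning card : List Int)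
    (h : INV d) : finalCard d g winning card = altCard d g winning card := by
  rw [altCard_eq_bumps]
  show (PySem.List.pyRange 0 (d.getD g 1) 1).foldl
      (fun d' _ => (finalInner winning card (d', g + 1)).1)
      (if d.contains g then d else d.insert g 1) = _
  have hd1 : (if d.contains g then d else d.insert g 1) = d.setdefault g 1 := by
    by_cases hg : d.contains g = true
    · rw [PySem.Dict.setdefault_of_contains _ _ hg, if_pos hg]
    · rw [PySem.Dict.setdefault_of_not_contains _ _ (by simpa using hg), if_neg hg]
  have hbody : (fun (d : PySem.Dict Int Int) (_ : Int) => (finalInner winning card (d, g + 1)).1)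
      = fun d _ => bumps d (g + 1) (card.countP (fun n => winning.contains n)) 1 := by
    funext d j
    rw [finalInner_eq_bumps]
  rw [hd1, hbody, foldl_const_iterate, PySem.List.length_pyRange_one,
      iter_pass_eq _ (by have := getD_ge_one d g h; omega),
      Int.toNat_of_nonneg (by have := getD_ge_one d g h; omega : (0:Int) ≤ d.getD g 1 - 0),
      sub_zero]

theorem inv_altCard (d : PySem.Dict Int Int) (g : Int) (winning card : List Int)
    (h : INV d) : INV (altCard d g winning card) := by
  rw [altCard_eq_bumps]
  have hsd : INV (d.setdefault g 1) := by
    by_cases hg : d.contains g = true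
    · rw [PySem.Dict.setdefault_of_contains _ _ hg]; exact h
    · rw [PySem.Dict.setdefault_of_not_contains _ _ (by simpa using hg)]
      exact inv_insert _ _ _ h le_rfl
  exact inv_bumps _ _ _ _ hsd (by have := getD_ge_one d g h; omega)

theorem fold_eq (results : List (Int × List Int × List Int)) (d : PySem.Dict Int Int)
    (h : INV d) :
    results.foldl (fun d r => finalCard d r.1 r.2.1 r.2.2) d
      = results.foldl (fun d r => altCard d r.1 r.2.1 r.2.2) d := by
  induction results generalizing d with
  | nil => rfl
  | cons r results ih =>
    simp only [List.foldl_cons]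
    rw [card_step_eq _ _ _ _ h]
    exact ih _ (inv_altCard _ _ _ _ h)

-- ===== VERDICT (by name: the statement is the Claim_ definition above) =====
theorem final_spec : Claim_equal_final := by
  intro results _
  unfold Spec_final final final_alt
  rw [fold_eq results PySem.Dict.empty inv_empty]
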